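-- pv_equiv track=rewrite | github.com/joachimnormark/sociogram | app.py | layout_grid
-- ===== SOURCE A (Python) =====
-- import math
--
-- def layout_grid(names):
--     n = len(names)
--     cols = math.ceil(math.sqrt(n))
--     spacing = 3
--     positions = {}
--     for idx, name in enumerate(names):
--         r = idx // cols
--         c = idx % cols
--         positions[name] = (c * spacing, -r * spacing)
--     return positions
-- ===== SOURCE B (Python) =====
-- import math
--
-- def layout_grid(names):
--     n = len(names)
--     cols = math.ceil(math.sqrt(n))
--     rows = -(-n // cols) if n else 0
--     positions = {}
--     idx = 0
--     for r in range(rows):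
--         for c in range(cols):
--             if idx < n:
--                 positions[names[idx]] = (c * 3, -r * 3)
--                 idx += 1
--     return positions
-- ===== Notes on version B (the rewrite author's own statement) =====
-- stated objective: alternative
-- what changed: Replaces A's flat enumerate pass with divmod per index by a row-major 2D grid walk: nested loops over rows (computed by ceiling division) and columns with a running index that stops after n names.
import Mathlib
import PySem

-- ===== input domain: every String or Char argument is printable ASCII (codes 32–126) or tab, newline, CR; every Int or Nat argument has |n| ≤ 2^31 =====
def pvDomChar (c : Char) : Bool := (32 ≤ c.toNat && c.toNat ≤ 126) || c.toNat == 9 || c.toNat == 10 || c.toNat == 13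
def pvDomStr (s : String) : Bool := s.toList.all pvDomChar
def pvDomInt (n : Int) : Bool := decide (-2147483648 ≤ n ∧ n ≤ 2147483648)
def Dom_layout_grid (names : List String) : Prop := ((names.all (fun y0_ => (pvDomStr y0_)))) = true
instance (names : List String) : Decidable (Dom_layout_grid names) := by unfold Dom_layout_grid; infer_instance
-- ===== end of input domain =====

-- B replaces A's flat enumerate+divmod pass by a row-major 2D grid walk (nested row/column
-- loops with a running index); same return value, objective: alternative decomposition.

-- math.ceil(math.sqrt(n)) for a list length n, exact on this integer domain
-- (float sqrt is exact here since n ≤ 2^31): the least k with n ≤ k*k.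
def pvCeilSqrt (n : Int) : Int :=
  let s := Nat.sqrt n.toNat
  if s * s = n.toNat then (s : Int) else ((s : Int) + 1)

-- ===== PORT A =====
def layout_grid (names : List String) : List (String × Int × Int) :=
  let n : Int := names.length
  let cols : Int := pvCeilSqrt n
  let spacing : Int := 3
  let positions : PySem.Dict String (Int × Int) :=
    (PySem.List.enumerate names 0).foldl
      (fun d p =>
        let r := PySem.Int.floordiv p.1 cols
        let c := PySem.Int.mod p.1 cols
        d.insert p.2 (c * spacing, -r * spacing))
      PySem.Dict.empty
  positions.items

-- ===== PORT B =====
def layout_grid_alt (names : List String) : List (String × Int × Int) :=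
  let n : Int := names.length
  let cols : Int := pvCeilSqrt n
  let rows : Int := if n ≠ 0 then -(PySem.Int.floordiv (-n) cols) else 0
  let st : Int × PySem.Dict String (Int × Int) :=
    (PySem.List.pyRange 0 rows 1).foldl
      (fun st r =>
        (PySem.List.pyRange 0 cols 1).foldl
          (fun st c =>
            if st.1 < n then
              (st.1 + 1, st.2.insert (PySem.List.pyGetD names st.1 "") (c * 3, -r * 3))
            else st)
          st)
      ((0 : Int), PySem.Dict.empty)
  st.2.items

-- ===== PRECONDITION & SPEC =====
def Spec_layout_grid (names : List String) (out : List (String × Int × Int)) : Prop := out = layout_grid_alt names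
instance (names : List String) (out : List (String × Int × Int)) : Decidable (Spec_layout_grid names out) := by unfold Spec_layout_grid; infer_instance

-- ===== CLAIM (what is proved, stated in full; the proofs are below) =====
def Claim_equal_layout_grid : Prop := ∀ (names : List String), Dom_layout_grid names → Spec_layout_grid names (layout_grid names)

-- ===== LEMMAS AND PROOFS =====

-- A's per-index insertion step (exactly A's loop body, with the index as argument).
def pvStep (names : List String) (cols : Int) (d : PySem.Dict String (Int × Int)) (k : Int) :
    PySem.Dict String (Int × Int) :=
  d.insert (PySem.List.pyGetD names k "")
    (PySem.Int.mod k cols * 3, -(PySem.Int.floordiv k cols) * 3)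

theorem pv_inner (names : List String) (n cols r : Int) (hc : 0 < cols) :
    ∀ (fuel : Nat) (c0 : Int) (d : PySem.Dict String (Int × Int)),
      0 ≤ c0 → c0 ≤ cols → fuel = (cols - c0).toNat →
      (PySem.List.pyRange c0 cols 1).foldl
          (fun st c =>
            if st.1 < n then
              (st.1 + 1, st.2.insert (PySem.List.pyGetD names st.1 "") (c * 3, -r * 3))
            else st)
          (min (r * cols + c0) n, d)
        = (min (r * cols + cols) n,
           (PySem.List.pyRange (min (r * cols + c0) n) (min (r * cols + cols) n) 1).foldl
             (pvStep names cols) d) := by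
  intro fuel
  induction fuel with
  | zero =>
    intro c0 d h0 hle hf
    have hc0 : c0 = cols := by omega
    subst hc0
    rw [PySem.List.pyRange_one_eq_nil le_rfl, PySem.List.pyRange_one_eq_nil le_rfl]
    simp
  | succ fuel ih =>
    intro c0 d h0 hle hf
    have hlt : c0 < cols := by omega
    rw [PySem.List.pyRange_one_cons hlt]
    simp only [List.foldl_cons]
    by_cases h : r * cols + c0 < n
    · have hmin : min (r * cols + c0) n = r * cols + c0 := by omega
      rw [hmin]
      simp only [h, if_pos]
      have hfd : PySem.Int.floordiv (r * cols + c0) cols = r :=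
        (PySem.Int.floordiv_eq_iff_of_pos hc).mpr ⟨by nlinarith, by nlinarith⟩
      have hmod : PySem.Int.mod (r * cols + c0) cols = c0 := by
        have hh := PySem.Int.floordiv_mul_add_mod (r * cols + c0) cols
        rw [hfd] at hh; linarith
      have h1 : min (r * cols + (c0 + 1)) n = r * cols + c0 + 1 := by omega
      have hstate : (r * cols + c0 + 1, d.insert (PySem.List.pyGetD names (r * cols + c0) "") (c0 * 3, -r * 3))
          = (min (r * cols + (c0 + 1)) n, pvStep names cols d (r * cols + c0)) := by
        rw [pvStep, hfd, hmod, h1]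
      rw [hstate, ih (c0 + 1) _ (by omega) (by omega) (by omega)]
      have hcons : PySem.List.pyRange (r * cols + c0) (min (r * cols + cols) n) 1
          = (r * cols + c0) :: PySem.List.pyRange (r * cols + c0 + 1) (min (r * cols + cols) n) 1 :=
        PySem.List.pyRange_one_cons (by omega)
      rw [hcons]
      simp only [List.foldl_cons]
      rw [h1]
    · have hmin : min (r * cols + c0) n = n := by omega
      rw [hmin, if_neg (lt_irrefl n)]
      have h1 : min (r * cols + (c0 + 1)) n = n := by omega
      have hn2 : (n, d) = (min (r * cols + (c0 + 1)) n, d) := by rw [h1]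
      rw [hn2, ih (c0 + 1) d (by omega) (by omega) (by omega), h1]

theorem pv_outer (names : List String) (n cols rows : Int) (hc : 0 < cols)
    (hrc : n ≤ rows * cols) :
    ∀ (fuel : Nat) (r0 : Int) (d : PySem.Dict String (Int × Int)),
      0 ≤ r0 → r0 ≤ rows → fuel = (rows - r0).toNat →
      (PySem.List.pyRange r0 rows 1).foldl
          (fun st r =>
            (PySem.List.pyRange 0 cols 1).foldl
              (fun st c =>
                if st.1 < n then
                  (st.1 + 1, st.2.insert (PySem.List.pyGetD names st.1 "") (c * 3, -r * 3))
                else st)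
              st)
          (min (r0 * cols) n, d)
        = (min (rows * cols) n,
           (PySem.List.pyRange (min (r0 * cols) n) (min (rows * cols) n) 1).foldl
             (pvStep names cols) d) := by
  intro fuel
  induction fuel with
  | zero =>
    intro r0 d h0 hle hf
    have hr0 : r0 = rows := by omega
    subst hr0
    rw [PySem.List.pyRange_one_eq_nil le_rfl, PySem.List.pyRange_one_eq_nil le_rfl]
    simp
  | succ fuel ih =>
    intro r0 d h0 hle hf
    have hlt : r0 < rows := by omega
    rw [PySem.List.pyRange_one_cons hlt]
    simp only [List.foldl_cons]
    have hz : min (r0 * cols) n = min (r0 * cols + 0) n := by omega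
    rw [hz, pv_inner names n cols r0 hc cols.toNat 0 d le_rfl hc.le (by omega)]
    have hm1 : r0 * cols + cols = (r0 + 1) * cols := by ring
    rw [hm1, ih (r0 + 1) _ (by omega) (by omega) (by omega)]
    have hle1 : r0 * cols ≤ (r0 + 1) * cols := by nlinarith
    have hle2 : (r0 + 1) * cols ≤ rows * cols := by nlinarith
    have hsplit : PySem.List.pyRange (min (r0 * cols + 0) n) (min (rows * cols) n) 1
        = PySem.List.pyRange (min (r0 * cols + 0) n) (min ((r0 + 1) * cols) n) 1
          ++ PySem.List.pyRange (min ((r0 + 1) * cols) n) (min (rows * cols) n) 1 :=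
      PySem.List.pyRange_one_append _ _ _ (by omega) (by omega)
    rw [hsplit, List.foldl_append]

-- ===== VERDICT (by name: the statement is the Claim_ definition above) =====
theorem pvCeilSqrt_pos (n : Int) (hn : 0 < n) : 0 < pvCeilSqrt n := by
  unfold pvCeilSqrt
  simp only []
  split
  · rename_i h
    rcases Nat.eq_zero_or_pos (Nat.sqrt n.toNat) with h0 | h0
    · rw [h0] at h; omega
    · exact_mod_cast h0
  · positivity

theorem layout_grid_spec : Claim_equal_layout_grid := by
  intro names _
  unfold Spec_layout_grid layout_grid layout_grid_alt
  by_cases hnil : names = []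
  · subst hnil; rfl
  · have hpos : 0 < names.length := List.length_pos_of_ne_nil hnil
    have hn : (0:Int) < (names.length : Int) := by exact_mod_cast hpos
    have hne : ((names.length : Int)) ≠ 0 := by omega
    simp only [hne, ne_eq, not_false_iff, if_pos]
    set n : Int := (names.length : Int) with hndef
    set cols : Int := pvCeilSqrt n with hcols
    set rows : Int := -(PySem.Int.floordiv (-n) cols) with hrows
    have hc : 0 < cols := pvCeilSqrt_pos n hn
    have hbr : (rows - 1) * cols < n ∧ n ≤ rows * cols :=
      (PySem.Int.neg_floordiv_neg_eq_iff_of_pos hc).mp hrows.symm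
    have hrpos : 0 < rows := by nlinarith [hbr.2]
    have hinit : ((0 : Int), (PySem.Dict.empty : PySem.Dict String (Int × Int)))
        = (min (0 * cols) n, PySem.Dict.empty) := by
      rw [zero_mul, min_eq_left hn.le]
    rw [hinit, pv_outer names n cols rows hc hbr.2 rows.toNat 0 _ le_rfl hrpos.le (by omega)]
    rw [PySem.List.enumerate_eq_map_pyRange names "", List.foldl_map, PySem.List.len_eq]
    have hr0 : min (0 * cols) n = 0 := by rw [zero_mul]; omega
    have hr1 : min (rows * cols) n = n := by omega
    rw [hr0, hr1]
    rfl
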